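-- pv_equiv track=rewrite | github.com/rickypang0219/aws-backtest-pipeline | src/backtest/backtest_unit/int_trades/handlers.py | _generate_combinatorial_filters
-- ===== SOURCE A (Python) =====
-- import itertools
--
-- def _generate_combinatorial_filters(
--     base_conditions: list[str],
-- ) -> list[str]:
--     condition_names = base_conditions
--
--     and_filters = [
--         "_AND_".join(combo_names)
--         for r in range(2, len(condition_names) + 1)
--         for combo_names in itertools.combinations(condition_names, r)
--     ]
--
--     or_filters = [
--         "_OR_".join(combo_names)
--         for r in range(2, len(condition_names) + 1)
--         for combo_names in itertools.combinations(condition_names, r)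
--     ]
--
--     return base_conditions + and_filters + or_filters
-- ===== SOURCE B (Python) =====
-- def _generate_combinatorial_filters(
--     base_conditions: list[str],
-- ) -> list[str]:
--     def combos(items, r):
--         # size-r subsets in itertools.combinations (index-lexicographic) order:
--         # include the head then choose r-1 from the tail, or skip the head.
--         if r == 0:
--             return [[]]
--         if not items:
--             return []
--         head, rest = items[0], items[1:]
--         return [[head] + c for c in combos(rest, r - 1)] + combos(rest, r)
--
--     all_combos = []
--     for r in range(2, len(base_conditions) + 1):
--         all_combos.extend(combos(base_conditions, r))
--
--     and_filters = ["_AND_".join(c) for c in all_combos]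
--     or_filters = ["_OR_".join(c) for c in all_combos]
--     return base_conditions + and_filters + or_filters
-- ===== Notes on version B (the rewrite author's own statement) =====
-- stated objective: alternative
-- what changed: Replaces the two itertools.combinations comprehensions with a hand-written include/skip recursion that enumerates each size-r subset once into a shared list, from which both the _AND_ and _OR_ joins are built.
import Mathlib
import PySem

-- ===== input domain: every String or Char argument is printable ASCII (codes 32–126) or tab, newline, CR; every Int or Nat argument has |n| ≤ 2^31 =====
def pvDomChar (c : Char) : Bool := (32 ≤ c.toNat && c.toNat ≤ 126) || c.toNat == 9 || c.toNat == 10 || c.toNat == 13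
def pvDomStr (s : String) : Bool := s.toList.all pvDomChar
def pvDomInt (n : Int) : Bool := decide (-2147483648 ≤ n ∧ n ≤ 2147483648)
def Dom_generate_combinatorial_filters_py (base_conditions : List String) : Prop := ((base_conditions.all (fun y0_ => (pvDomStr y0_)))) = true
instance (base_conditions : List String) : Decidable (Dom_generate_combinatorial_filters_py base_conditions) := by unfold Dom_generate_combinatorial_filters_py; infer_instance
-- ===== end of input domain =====

-- B enumerates the size-r subsets once by an include/skip recursion (same lexicographic order
-- as itertools.combinations) and reuses that single list for both the AND and OR joins.


-- ===== PORT A =====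
def generate_combinatorial_filters_py (base_conditions : List String) : List String :=
  let condition_names := base_conditions
  let and_filters :=
    (PySem.List.pyRange 2 ((condition_names.length : Int) + 1) 1).flatMap
      (fun r => (PySem.List.combinations condition_names r.toNat).map
        (fun combo_names => PySem.Str.join "_AND_" combo_names))
  let or_filters :=
    (PySem.List.pyRange 2 ((condition_names.length : Int) + 1) 1).flatMap
      (fun r => (PySem.List.combinations condition_names r.toNat).map
        (fun combo_names => PySem.Str.join "_OR_" combo_names))
  base_conditions ++ and_filters ++ or_filters

-- ===== PORT B =====
-- Source B's `combos`: include the head then choose r-1 from the tail, or skip the head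
def pvAltCombos : List String → Nat → List (List String)
  | _, 0 => [[]]
  | [], _ + 1 => []
  | x :: rest, r + 1 => (pvAltCombos rest r).map (fun c => x :: c) ++ pvAltCombos rest (r + 1)

def generate_combinatorial_filters_py_alt (base_conditions : List String) : List String :=
  let all_combos :=
    (PySem.List.pyRange 2 ((base_conditions.length : Int) + 1) 1).flatMap
      (fun r => pvAltCombos base_conditions r.toNat)
  let and_filters := all_combos.map (fun c => PySem.Str.join "_AND_" c)
  let or_filters := all_combos.map (fun c => PySem.Str.join "_OR_" c)
  base_conditions ++ and_filters ++ or_filters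

-- ===== PRECONDITION & SPEC =====
def Spec_generate_combinatorial_filters_py (base_conditions : List String) (out : List String) : Prop := out = generate_combinatorial_filters_py_alt base_conditions
instance (base_conditions : List String) (out : List String) : Decidable (Spec_generate_combinatorial_filters_py base_conditions out) := by unfold Spec_generate_combinatorial_filters_py; infer_instance

-- ===== CLAIM (what is proved, stated in full; the proofs are below) =====
def Claim_equal_generate_combinatorial_filters_py : Prop := ∀ (base_conditions : List String), Dom_generate_combinatorial_filters_py base_conditions → Spec_generate_combinatorial_filters_py base_conditions (generate_combinatorial_filters_py base_conditions)

-- ===== LEMMAS AND PROOFS =====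
theorem pvAltCombos_eq_combinations (xs : List String) (r : Nat) :
    pvAltCombos xs r = PySem.List.combinations xs r := by
  induction xs generalizing r with
  | nil =>
      cases r <;> simp [pvAltCombos, PySem.List.combinations_zero, PySem.List.combinations_nil_succ]
  | cons x rest ih =>
      cases r with
      | zero => simp [pvAltCombos, PySem.List.combinations_zero]
      | succ r => simp [pvAltCombos, PySem.List.combinations_cons_succ, ih]

-- ===== VERDICT (by name: the statement is the Claim_ definition above) =====
theorem generate_combinatorial_filters_py_spec : Claim_equal_generate_combinatorial_filters_py := by
  intro base_conditions _
  unfold Spec_generate_combinatorial_filters_py generate_combinatorial_filters_py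
    generate_combinatorial_filters_py_alt
  simp [pvAltCombos_eq_combinations, List.map_flatMap]
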